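-- pv_equiv track=rewrite | github.com/MrBrantCode/unitest_baseline | mut_generate/mist_train_cf/cf_44390/solution.py | primeFibonacci
-- ===== SOURCE A (Python) =====
-- def primeFibonacci(n):
--     # Sieve of Eratosthenes algorithm to generate prime numbers
--     prime = [True for i in range(n+1)]
--     p = 2
--     while (p * p <= n):
--         if (prime[p] == True):
--             for i in range(p * p, n+1, p):
--                 prime[i] = False
--         p += 1
--     primes = []
--     for p in range(2, n):
--         if prime[p]:
--             primes.append(p)
--
--     # Generate Fibonacci sequence
--     fibs = [0, 1]
--     while fibs[-1] < n:
--         fibs.append(fibs[-1] + fibs[-2])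
--
--     # Find prime Fibonacci numbers under n
--     prime_fibs = [x for x in fibs if x in primes]
--     return prime_fibs
-- ===== SOURCE B (Python) =====
-- def primeFibonacci(n):
--     # Enumerate the O(log n) Fibonacci numbers below n directly and test each
--     # by trial division, instead of sieving all integers up to n.
--     def is_prime(x):
--         if x < 2:
--             return False
--         d = 2
--         while d * d <= x:
--             if x % d == 0:
--                 return False
--             d += 1
--         return True
--
--     res = []
--     a, b = 0, 1
--     while a < n:
--         if is_prime(a):
--             res.append(a)
--         a, b = b, a + b
--     return res
-- ===== Notes on version B (the rewrite author's own statement) =====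
-- stated objective: faster
-- what changed: Replaces the Sieve of Eratosthenes over all integers up to n (plus a quadratic 'x in primes' list scan) by a single loop over the O(log n) Fibonacci numbers below n, testing each by trial division.
import Mathlib
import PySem

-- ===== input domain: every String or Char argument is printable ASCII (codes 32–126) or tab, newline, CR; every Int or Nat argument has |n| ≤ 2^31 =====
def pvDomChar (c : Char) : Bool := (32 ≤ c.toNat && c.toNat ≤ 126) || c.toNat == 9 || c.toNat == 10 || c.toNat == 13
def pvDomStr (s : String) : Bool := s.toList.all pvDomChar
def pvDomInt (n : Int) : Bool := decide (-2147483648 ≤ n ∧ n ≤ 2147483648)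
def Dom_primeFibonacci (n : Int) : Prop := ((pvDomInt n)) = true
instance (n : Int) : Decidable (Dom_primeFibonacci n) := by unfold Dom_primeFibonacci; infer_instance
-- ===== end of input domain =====

-- B replaces A's Sieve of Eratosthenes up to n (plus an 'x in primes' list scan) by one loop
-- over the Fibonacci numbers below n, testing each by trial division (objective: faster).

-- ===== PORT A =====

-- inner sieve loop: 'for i in range(p*p, n+1, p): prime[i] = False'
-- (the boolean list is held as an Array; 'setIfInBounds i.toNat' is exact here:
--  every index i satisfies 0 ≤ p*p ≤ i ≤ n < size)
def pvSieveMark (n p : Int) (prime : Array Bool) : Array Bool :=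
  (PySem.List.pyRange (p * p) (n + 1) p).foldl
    (fun pr i => pr.setIfInBounds i.toNat false) prime

-- outer sieve loop: 'while p*p <= n: if prime[p] == True: …; p += 1'
-- ('getD p.toNat' is exact here: 0 ≤ 2 ≤ p ∧ p*p ≤ n keeps p < size)
def pvSieveLoop (n p : Int) (prime : Array Bool) : Array Bool :=
  if p * p ≤ n then
    pvSieveLoop n (p + 1)
      (if prime.getD p.toNat false = true then pvSieveMark n p prime else prime)
  else prime
termination_by (n + 1 - p).toNat
decreasing_by
  rename_i h
  have hp : p ≤ n := by nlinarith [sq_nonneg p, sq_nonneg (p - 1)]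
  omega

-- last/second-to-last of an appended list (cited by pvFibLoop's invariant and termination proofs)
theorem pvLast_append {a : Type} (xs : List a) (v : a) (d : a) :
    PySem.List.pyGetD (xs ++ [v]) (-1) d = v := by
  simp [PySem.List.pyGetD, PySem.List.pyGet?, PySem.List.pyIdx?]

theorem pvPenult_append {a : Type} (xs : List a) (v : a) (d : a) (h : 1 <= xs.length) :
    PySem.List.pyGetD (xs ++ [v]) (-2) d = PySem.List.pyGetD xs (-1) d := by
  simp only [PySem.List.pyGetD, PySem.List.pyGet?, PySem.List.pyIdx?]
  have h2 : ¬ ((0:Int) ≤ -2) := by omega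
  have h1 : ¬ ((0:Int) ≤ -1) := by omega
  have hlen : (-(((xs ++ [v]).length : Int)) ≤ -2) := by simp; omega
  have hlen1 : (-((xs.length : Int)) ≤ -1) := by omega
  simp only [if_neg h2, if_neg h1, if_pos hlen, if_pos hlen1]
  simp
  rw [List.getElem_append_left (by omega)]
  rw [List.getElem?_eq_getElem (by omega)]
  simp

-- invariant of A's fibs list: it ends in two entries 0 ≤ s ≤ l with 1 ≤ l
-- (carried as a hypothesis only to justify termination of the literal while-loop)
def pvFibInv (fibs : List Int) : Prop :=
  1 ≤ PySem.List.pyGetD fibs (-1) 0 ∧ 0 ≤ PySem.List.pyGetD fibs (-2) 0 ∧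
    PySem.List.pyGetD fibs (-2) 0 ≤ PySem.List.pyGetD fibs (-1) 0 ∧ 1 ≤ fibs.length

-- 'while fibs[-1] < n: fibs.append(fibs[-1] + fibs[-2])'
def pvFibLoop (n : Int) (fibs : List Int) (h : pvFibInv fibs) : List Int :=
  if PySem.List.pyGetD fibs (-1) 0 < n then
    pvFibLoop n (fibs ++ [PySem.List.pyGetD fibs (-1) 0 + PySem.List.pyGetD fibs (-2) 0])
      (by
        obtain ⟨h1, h2, h3, h4⟩ := h
        refine ⟨?_, ?_, ?_, ?_⟩
        · rw [pvLast_append]; omega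
        · rw [pvPenult_append _ _ _ h4]; omega
        · rw [pvLast_append, pvPenult_append _ _ _ h4]; omega
        · simp)
  else fibs
termination_by ((n - PySem.List.pyGetD fibs (-1) 0).toNat, (n - PySem.List.pyGetD fibs (-2) 0).toNat)
decreasing_by
  rename_i hlt
  obtain ⟨h1, h2, h3, h4⟩ := h
  rw [pvLast_append, pvPenult_append _ _ _ h4]
  rcases eq_or_lt_of_le h2 with hs | hs
  · rw [← hs, add_zero]
    exact Prod.Lex.right _ (by omega)
  · exact Prod.Lex.left _ _ (by omega)

def primeFibonacci (n : Int) : List Int :=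
  let prime := Array.replicate (n + 1).toNat true
  let prime := pvSieveLoop n 2 prime
  let primes := (PySem.List.pyRange 2 n 1).foldl
    (fun acc p => if prime.getD p.toNat false = true then acc ++ [p] else acc) []
  let fibs := pvFibLoop n [0, 1] (by unfold pvFibInv; decide)
  fibs.filter (fun x => primes.contains x)

-- ===== PORT B =====

-- 'while d*d <= x: if x % d == 0: return False; d += 1; return True'
def pvTrial (x d : Int) : Bool :=
  if d * d ≤ x then
    if PySem.Int.mod x d = 0 then false else pvTrial x (d + 1)
  else true
termination_by (x + 1 - d).toNat
decreasing_by
  rename_i h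
  have hd : d ≤ x := by nlinarith [sq_nonneg d, sq_nonneg (d - 1)]
  omega

def pvIsPrime (x : Int) : Bool := if x < 2 then false else pvTrial x 2

-- 'while a < n: if is_prime(a): res.append(a); a, b = b, a + b'
-- (the hypothesis 0 ≤ a ≤ b, 1 ≤ b is the loop invariant, carried for termination)
def pvFibCollect (n a b : Int) (res : List Int) (h : 0 ≤ a ∧ 1 ≤ b ∧ a ≤ b) : List Int :=
  if a < n then
    pvFibCollect n b (a + b) (if pvIsPrime a then res ++ [a] else res) (by omega)
  else res
termination_by ((n - a).toNat, (n - b).toNat)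
decreasing_by
  rename_i hlt
  obtain ⟨h1, h2, h3⟩ := h
  rcases lt_or_eq_of_le h3 with hab | hab
  · exact Prod.Lex.left _ _ (by omega)
  · subst hab; exact Prod.Lex.right _ (by omega)

def primeFibonacci_alt (n : Int) : List Int :=
  pvFibCollect n 0 1 [] (by norm_num)

-- ===== PRECONDITION & SPEC =====
def Spec_primeFibonacci (n : Int) (out : List Int) : Prop := out = primeFibonacci_alt n
instance (n : Int) (out : List Int) : Decidable (Spec_primeFibonacci n out) := by unfold Spec_primeFibonacci; infer_instance

-- ===== CLAIM (what is proved, stated in full; the proofs are below) =====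
def Claim_equal_primeFibonacci : Prop := ∀ (n : Int), Dom_primeFibonacci n → Spec_primeFibonacci n (primeFibonacci n)

-- ===== LEMMAS AND PROOFS =====

-- ---------- ghost sequences ----------

-- the values A's while-loop appends after a state ending in (second, last) = (s, l)
def pvTail (n l s : Int) (h : 1 ≤ l ∧ 0 ≤ s ∧ s ≤ l) : List Int :=
  if l < n then (l + s) :: pvTail n (l + s) l (by omega) else []
termination_by ((n - l).toNat, (n - s).toNat)
decreasing_by
  rename_i hlt
  rcases eq_or_lt_of_le h.2.1 with hs | hs
  · rw [← hs, add_zero]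
    exact Prod.Lex.right _ (by omega)
  · exact Prod.Lex.left _ _ (by omega)

-- the values B's while-loop visits from state (a, b)
def pvGhost (n a b : Int) (h : 0 ≤ a ∧ 1 ≤ b ∧ a ≤ b) : List Int :=
  if a < n then a :: pvGhost n b (a + b) (by omega) else []
termination_by ((n - a).toNat, (n - b).toNat)
decreasing_by
  rename_i hlt
  rcases lt_or_eq_of_le h.2.2 with hab | hab
  · exact Prod.Lex.left _ _ (by omega)
  · subst hab; exact Prod.Lex.right _ (by omega)

theorem pvTail_congr (n l s l' s' : Int) (hl : l = l') (hs : s = s')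
    (h : 1 ≤ l ∧ 0 ≤ s ∧ s ≤ l) (h' : 1 ≤ l' ∧ 0 ≤ s' ∧ s' ≤ l') :
    pvTail n l s h = pvTail n l' s' h' := by
  subst hl; subst hs; rfl

theorem pvGhost_congr (n a b a' b' : Int) (ha : a = a') (hb : b = b')
    (h : 0 ≤ a ∧ 1 ≤ b ∧ a ≤ b) (h' : 0 ≤ a' ∧ 1 ≤ b' ∧ a' ≤ b') :
    pvGhost n a b h = pvGhost n a' b' h' := by
  subst ha; subst hb; rfl

theorem pvTail_congr' (n l s l' s' : Int) (hl : l = l') (hs : s = s') (h : 1 ≤ l ∧ 0 ≤ s ∧ s ≤ l) :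
    pvTail n l s h = pvTail n l' s' (by rw [← hl, ← hs]; exact h) := by
  subst hl; subst hs; rfl

theorem pvGhost_congr' (n a b a' b' : Int) (ha : a = a') (hb : b = b') (h : 0 ≤ a ∧ 1 ≤ b ∧ a ≤ b) :
    pvGhost n a b h = pvGhost n a' b' (by rw [← ha, ← hb]; exact h) := by
  subst ha; subst hb; rfl

theorem pvFibLoop_eq_tail (n : Int) : ∀ (fibs : List Int) (h : pvFibInv fibs),
    pvFibLoop n fibs h =
      fibs ++ pvTail n (PySem.List.pyGetD fibs (-1) 0) (PySem.List.pyGetD fibs (-2) 0)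
        ⟨h.1, h.2.1, h.2.2.1⟩ := by
  intro fibs h
  induction fibs, h using pvFibLoop.induct n with
  | case1 fibs h hlt ih =>
    rw [pvFibLoop, if_pos hlt, ih]
    have hstep : pvTail n (PySem.List.pyGetD fibs (-1) 0) (PySem.List.pyGetD fibs (-2) 0)
        ⟨h.1, h.2.1, h.2.2.1⟩ =
        (PySem.List.pyGetD fibs (-1) 0 + PySem.List.pyGetD fibs (-2) 0) ::
          pvTail n (PySem.List.pyGetD fibs (-1) 0 + PySem.List.pyGetD fibs (-2) 0)
            (PySem.List.pyGetD fibs (-1) 0)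
            ⟨by have := h.1; have := h.2.1; omega,
             by have := h.1; omega,
             by have := h.2.1; have := h.2.2.1; omega⟩ := by
      rw [pvTail, if_pos hlt]
    rw [hstep, List.append_assoc]
    congr 1
    simp only [List.singleton_append]
    congr 1
    exact pvTail_congr n _ _ _ _ (pvLast_append _ _ _) (pvPenult_append _ _ _ h.2.2.2) _ _
  | case2 fibs h hlt =>
    rw [pvFibLoop, if_neg hlt, pvTail, if_neg hlt]
    simp

theorem pvFibCollect_eq_ghost (n : Int) : ∀ (a b : Int) (h : 0 ≤ a ∧ 1 ≤ b ∧ a ≤ b) (res : List Int),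
    pvFibCollect n a b res h = res ++ (pvGhost n a b h).filter pvIsPrime := by
  intro a b h
  induction a, b, h using pvGhost.induct n with
  | case1 a b h hlt ih =>
    intro res
    have hstep : pvGhost n a b h = a :: pvGhost n b (a + b) ⟨by omega, by omega, by omega⟩ := by
      rw [pvGhost, if_pos hlt]
    rw [pvFibCollect, if_pos hlt, hstep, List.filter_cons, ih]
    by_cases hp : pvIsPrime a = true <;> simp [hp]
  | case2 a b h hlt =>
    intro res
    rw [pvFibCollect, if_neg hlt, pvGhost, if_neg hlt]
    simp

theorem pvTail_ghost (n : Int) (P : Int → Bool)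
    (hP : ∀ x : Int, 0 ≤ x → P x = (decide (x < n) && pvIsPrime x)) :
    ∀ (l s : Int) (h : 1 ≤ l ∧ 0 ≤ s ∧ s ≤ l),
      (pvTail n l s h).filter P =
        (pvGhost n (l + s) (2 * l + s) (by omega)).filter pvIsPrime := by
  intro l s h
  induction l, s, h using pvTail.induct n with
  | case1 l s h hlt ih =>
    rw [pvTail, if_pos hlt, List.filter_cons]
    by_cases hls : l + s < n
    · have hstep : pvGhost n (l + s) (2 * l + s) (by omega) =
          (l + s) :: pvGhost n ((l + s) + l) (2 * (l + s) + l)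
            ⟨by omega, by omega, by omega⟩ := by
        rw [pvGhost, if_pos hls]
        exact congrArg _ (pvGhost_congr n (2 * l + s) ((l + s) + (2 * l + s))
          ((l + s) + l) (2 * (l + s) + l) (by ring) (by ring) _ _)
      have hPx : P (l + s) = pvIsPrime (l + s) := by
        rw [hP (l + s) (by omega)]
        simp [hls]
      rw [hstep, List.filter_cons, hPx, ih]
    · have hPx : P (l + s) = false := by
        rw [hP (l + s) (by omega)]
        simp [hls]
      rw [hPx]
      rw [pvGhost, if_neg hls]
      rw [pvTail, if_neg (show ¬ (l + s) < n from hls)]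
      simp
  | case2 l s h hlt =>
    rw [pvTail, if_neg hlt]
    rw [pvGhost, if_neg (show ¬ (l + s) < n by omega)]
    simp

-- ---------- trial division ----------

def pvTrialOK (x : Int) : Prop := ∀ d : Int, 2 ≤ d → d * d ≤ x → ¬ (d ∣ x)

theorem pvMod_eq_zero_iff (x d : Int) (hd : 0 < d) : PySem.Int.mod x d = 0 ↔ d ∣ x := by
  have h : PySem.Int.mod x d = x % d := by
    show Int.fmod x d = x % d
    rw [Int.fmod_eq_emod]
    simp [le_of_lt hd]
  rw [h]
  exact PySem.Int.emod_eq_zero_iff_dvd x d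

theorem pvTrial_iff (x : Int) : ∀ (d : Int), 2 ≤ d →
    (pvTrial x d = true ↔ ∀ e : Int, d ≤ e → e * e ≤ x → ¬ (e ∣ x)) := by
  intro d
  induction d using pvTrial.induct (x := x) with
  | case1 d hdd hmod =>
    intro hd2
    rw [pvTrial, if_pos hdd, if_pos hmod]
    simp only [Bool.false_eq_true, false_iff]
    intro hall
    exact hall d le_rfl hdd ((pvMod_eq_zero_iff x d (by omega)).mp hmod)
  | case2 d hdd hmod ih =>
    intro hd2
    rw [pvTrial, if_pos hdd, if_neg hmod]
    rw [ih (by omega)]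
    constructor
    · intro hall e hde hee hdvd
      rcases eq_or_lt_of_le hde with he | he
      · exact hmod ((pvMod_eq_zero_iff x d (by omega)).mpr (he ▸ hdvd))
      · exact hall e (by omega) hee hdvd
    · intro hall e hde hee hdvd
      exact hall e (by omega) hee hdvd
  | case3 d hdd =>
    intro hd2
    rw [pvTrial, if_neg hdd]
    simp only [true_iff]
    intro e hde hee _
    exact hdd (by nlinarith)

theorem pvIsPrime_iff (x : Int) : pvIsPrime x = true ↔ 2 ≤ x ∧ pvTrialOK x := by
  unfold pvIsPrime
  by_cases h : x < 2
  · simp [h]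
  · rw [if_neg h]
    rw [pvTrial_iff x 2 le_rfl]
    unfold pvTrialOK
    constructor
    · exact fun hall => ⟨by omega, hall⟩
    · exact fun hall => hall.2

-- ---------- sieve array lemmas ----------

def pvEntry (pr : Array Bool) (x : Int) : Bool := pr.getD x.toNat false

theorem pvGetD_eq (a : Array Bool) (i : Nat) (d : Bool) : a.getD i d = a[i]?.getD d := by
  rcases a with ⟨l⟩
  simp [Array.getD]
  split <;> simp_all

-- writing false anywhere keeps a false entry false
theorem pvEntry_setD_false (pr : Array Bool) (i x : Int) (hx : pvEntry pr x = false) :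
    pvEntry (pr.setIfInBounds i.toNat false) x = false := by
  unfold pvEntry at *
  rw [pvGetD_eq, Array.getElem?_setIfInBounds] at *
  split_ifs with h1 h2
  · rfl
  · rfl
  · exact hx

-- writing at a nonnegative index i ≠ x does not change entry x
theorem pvEntry_setD_other (pr : Array Bool) (i x : Int) (v : Bool)
    (hi : 0 ≤ i) (hx : 0 ≤ x) (hne : i ≠ x) :
    pvEntry (pr.setIfInBounds i.toNat v) x = pvEntry pr x := by
  unfold pvEntry
  rw [pvGetD_eq, pvGetD_eq, Array.getElem?_setIfInBounds]
  have h : i.toNat ≠ x.toNat := by omega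
  simp [h]

-- entry at an in-bounds nonnegative index after setting it
theorem pvEntry_setD_self (pr : Array Bool) (x : Int) (v : Bool)
    (hx : 0 ≤ x) (hb : x < (pr.size : Int)) :
    pvEntry (pr.setIfInBounds x.toNat v) x = v := by
  unfold pvEntry
  rw [pvGetD_eq, Array.getElem?_setIfInBounds]
  have h : x.toNat < pr.size := by omega
  simp [h]

theorem pvMarkFold_length (L : List Int) (pr : Array Bool) :
    (L.foldl (fun pr i => pr.setIfInBounds i.toNat false) pr).size = pr.size := by
  induction L generalizing pr with
  | nil => rfl
  | cons i L ih => simp [List.foldl_cons, ih, Array.size_setIfInBounds]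

theorem pvMarkFold_false (L : List Int) (pr : Array Bool) (x : Int) (hx : pvEntry pr x = false) :
    pvEntry (L.foldl (fun pr i => pr.setIfInBounds i.toNat false) pr) x = false := by
  induction L generalizing pr with
  | nil => exact hx
  | cons i L ih => exact ih _ (pvEntry_setD_false pr i x hx)

theorem pvMarkFold_notmem (L : List Int) (x : Int)
    (hL : ∀ i ∈ L, 0 ≤ i) (hx : 0 ≤ x) (hnm : x ∉ L) :
    ∀ pr : Array Bool, pvEntry (L.foldl (fun pr i => pr.setIfInBounds i.toNat false) pr) x = pvEntry pr x := by
  induction L with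
  | nil => intro pr; rfl
  | cons i L ih =>
    intro pr
    rw [List.foldl_cons, ih (fun j hj => hL j (List.mem_cons_of_mem _ hj))
      (fun hm => hnm (List.mem_cons_of_mem _ hm))]
    exact pvEntry_setD_other pr i x false (hL i List.mem_cons_self) hx
      (fun he => hnm (he ▸ List.mem_cons_self))

theorem pvMarkFold_mem (L : List Int) (x : Int) (hx : 0 ≤ x) :
    ∀ pr : Array Bool, x ∈ L → x < (pr.size : Int) →
      pvEntry (L.foldl (fun pr i => pr.setIfInBounds i.toNat false) pr) x = false := by
  induction L with
  | nil => intro pr hmem _; simp at hmem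
  | cons i L ih =>
    intro pr hmem hb
    rw [List.foldl_cons]
    by_cases he : i = x
    · subst he
      exact pvMarkFold_false L _ i (pvEntry_setD_self pr i false hx hb)
    · rcases List.mem_cons.mp hmem with h1 | h1
      · exact absurd h1.symm he
      · exact ih _ h1 (by rw [Array.size_setIfInBounds]; exact hb)

-- ---------- sieve loop lemmas ----------

theorem pvSieveLoop_false (n x : Int) : ∀ (p : Int) (pr : Array Bool),
    pvEntry pr x = false → pvEntry (pvSieveLoop n p pr) x = false := by
  intro p pr
  induction p, pr using pvSieveLoop.induct n with
  | case1 p pr hguard ih =>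
    intro hx
    rw [pvSieveLoop, if_pos hguard]
    apply ih
    split
    · exact pvMarkFold_false _ _ _ hx
    · exact hx
  | case2 p pr hguard =>
    intro hx
    rw [pvSieveLoop, if_neg hguard]
    exact hx

theorem pvSieveLoop_survive (n x : Int) (hx2 : 2 ≤ x) (hOK : pvTrialOK x) :
    ∀ (p : Int) (pr : Array Bool), 2 ≤ p →
      pvEntry (pvSieveLoop n p pr) x = pvEntry pr x := by
  intro p pr
  induction p, pr using pvSieveLoop.induct n with
  | case1 p pr hguard ih =>
    intro hp
    simp only [dite_eq_ite] at ih
    rw [pvSieveLoop, if_pos hguard, ih (by omega)]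
    have hnm : x ∉ PySem.List.pyRange (p * p) (n + 1) p := by
      intro hm
      rw [PySem.List.mem_pyRange_iff_of_pos (by omega)] at hm
      obtain ⟨h1, h2, h3⟩ := hm
      obtain ⟨c, hc⟩ := h3
      exact hOK p hp h1 ⟨p + c, by linarith [hc]⟩
    have hL : ∀ i ∈ PySem.List.pyRange (p * p) (n + 1) p, 0 ≤ i := by
      intro i hi
      rw [PySem.List.mem_pyRange_iff_of_pos (by omega)] at hi
      nlinarith [hi.1]
    split
    · exact pvMarkFold_notmem _ _ hL (by omega) hnm pr
    · rfl
  | case2 p pr hguard =>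
    intro _
    rw [pvSieveLoop, if_neg hguard]

theorem pvSieveLoop_clear (n q x : Int) (hq2 : 2 ≤ q) (hqd : q ∣ x) (hqOK : pvTrialOK q)
    (hqq : q * q ≤ x) (hx2 : 2 ≤ x) (hxn : x ≤ n) :
    ∀ (p : Int) (pr : Array Bool), 2 ≤ p → p ≤ q → (pr.size : Int) = n + 1 →
      pvEntry pr q = true → pvEntry (pvSieveLoop n p pr) x = false := by
  intro p pr
  induction p, pr using pvSieveLoop.induct n with
  | case1 p pr hguard ih =>
    intro hp hpq hlen hq
    simp only [dite_eq_ite] at ih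
    rw [pvSieveLoop, if_pos hguard]
    by_cases hpq' : p = q
    · subst hpq'
      unfold pvEntry at hq
      rw [if_pos hq]
      apply pvSieveLoop_false
      apply pvMarkFold_mem _ x (by omega)
      · rw [PySem.List.mem_pyRange_iff_of_pos (by omega)]
        refine ⟨hqq, by omega, ?_⟩
        obtain ⟨c, hc⟩ := hqd
        exact ⟨c - p, by rw [mul_sub]; omega⟩
      · omega
    · have hlt : p < q := lt_of_le_of_ne hpq hpq'
      have hq' : pvEntry (if pr.getD p.toNat false = true then pvSieveMark n p pr else pr) q = true := by
        split
        · have hnm : q ∉ PySem.List.pyRange (p * p) (n + 1) p := by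
            intro hm
            rw [PySem.List.mem_pyRange_iff_of_pos (by omega)] at hm
            obtain ⟨h1, h2, h3⟩ := hm
            obtain ⟨c, hc⟩ := h3
            exact hqOK p hp h1 ⟨p + c, by linarith [hc]⟩
          have hL : ∀ i ∈ PySem.List.pyRange (p * p) (n + 1) p, 0 ≤ i := by
            intro i hi
            rw [PySem.List.mem_pyRange_iff_of_pos (by omega)] at hi
            nlinarith [hi.1]
          rw [pvSieveMark, pvMarkFold_notmem _ _ hL (by omega) hnm pr]
          exact hq
        · exact hq
      have hlen' : (((if pr.getD p.toNat false = true then pvSieveMark n p pr else pr)).size : Int) = n + 1 := by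
        split
        · rw [pvSieveMark, pvMarkFold_length]; exact hlen
        · exact hlen
      exact ih (by omega) (by omega) hlen' hq'
  | case2 p pr hguard =>
    intro hp hpq hlen hq
    exfalso
    apply hguard
    calc p * p ≤ q * q := by nlinarith
    _ ≤ x := hqq
    _ ≤ n := hxn

theorem pvSieve_char (n x : Int) (hx2 : 2 ≤ x) (hxn : x ≤ n) :
    (pvEntry (pvSieveLoop n 2 (Array.replicate (n + 1).toNat true)) x = true ↔ pvTrialOK x) := by
  have hinit : ∀ y : Int, 0 ≤ y → y ≤ n → pvEntry (Array.replicate (n + 1).toNat true) y = true := by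
    intro y hy0 hyn
    unfold pvEntry
    rw [pvGetD_eq, Array.getElem?_replicate]
    have h : y.toNat < (n + 1).toNat := by omega
    simp [h]
  constructor
  · intro htrue
    by_contra hnok
    unfold pvTrialOK at hnok
    push_neg at hnok
    obtain ⟨d, hd2, hdd, hddvd⟩ := hnok
    have hdx : d ≤ x := by nlinarith
    have hxnat : ((x.toNat : Int)) = x := by omega
    have hqprime : Nat.Prime x.toNat.minFac := Nat.minFac_prime (by omega)
    have hq2 : (2:Int) ≤ ((x.toNat.minFac : Nat) : Int) := by exact_mod_cast hqprime.two_le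
    have hqdvd : ((x.toNat.minFac : Nat) : Int) ∣ x := by
      rw [← hxnat]
      exact_mod_cast Nat.minFac_dvd x.toNat
    have hdnat : d.toNat ∣ x.toNat := by
      have h1 : ((d.toNat : Int)) ∣ ((x.toNat : Int)) := by
        rw [Int.toNat_of_nonneg (show (0:Int) ≤ d by omega), hxnat]
        exact hddvd
      exact_mod_cast h1
    have hqled : ((x.toNat.minFac : Nat) : Int) ≤ d := by
      have := Nat.minFac_le_of_dvd (m := d.toNat) (by omega) hdnat
      omega
    have hqq : ((x.toNat.minFac : Nat) : Int) * ((x.toNat.minFac : Nat) : Int) ≤ x := le_trans (mul_le_mul hqled hqled (by omega) (by omega)) hdd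
    have hqOK : pvTrialOK ((x.toNat.minFac : Nat) : Int) := by
      intro e he2 hee hedvd
      have henat : e.toNat ∣ x.toNat.minFac := by
        have h1 : ((e.toNat : Int)) ∣ ((x.toNat.minFac : Int)) := by
          rw [Int.toNat_of_nonneg (show (0:Int) ≤ e by omega)]
          exact hedvd
        exact_mod_cast h1
      rcases hqprime.eq_one_or_self_of_dvd _ henat with h | h
      · omega
      · have he : e = ((x.toNat.minFac : Nat) : Int) := by omega
        nlinarith
    have hfin := pvSieveLoop_clear n ((x.toNat.minFac : Nat) : Int) x hq2 hqdvd hqOK hqq hx2 hxn 2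
      (Array.replicate (n + 1).toNat true) (by omega) hq2
      (by simp; omega) (hinit ((x.toNat.minFac : Nat) : Int) (by omega) (by omega))
    rw [hfin] at htrue
    exact absurd htrue (by simp)
  · intro hok
    rw [pvSieveLoop_survive n x hx2 hok 2 _ (by omega)]
    exact hinit x (by omega) hxn

-- ---------- assembling ----------

theorem pvIsPrime_zero : pvIsPrime 0 = false := by rw [pvIsPrime]; norm_num

theorem pvIsPrime_one : pvIsPrime 1 = false := by rw [pvIsPrime]; norm_num

-- B's ghost sequence started at (0, 1), with the non-prime fibs 0 and 1 filtered away
theorem pvGhost01 (n : Int) (h : (0:Int) ≤ 0 ∧ (1:Int) ≤ 1 ∧ (0:Int) ≤ 1) :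
    (pvGhost n 0 1 h).filter pvIsPrime = (pvGhost n 1 2 (by norm_num)).filter pvIsPrime := by
  by_cases h0 : (0:Int) < n
  · rw [pvGhost, if_pos h0, List.filter_cons, pvIsPrime_zero]
    simp only [Bool.false_eq_true, if_false]
    rw [pvGhost_congr' n 1 (0+1) 1 1 rfl (by norm_num)]
    by_cases h1 : (1:Int) < n
    · rw [pvGhost, if_pos h1, List.filter_cons, pvIsPrime_one]
      simp only [Bool.false_eq_true, if_false]
      rw [pvGhost_congr' n 1 (1+1) 1 2 rfl (by norm_num)]
    · rw [pvGhost, if_neg h1, pvGhost, if_neg h1]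
  · have h1 : ¬ (1:Int) < n := by omega
    rw [pvGhost, if_neg h0, pvGhost, if_neg h1]

-- membership in A's primes list agrees with B's trial-division test on 0 ≤ x
theorem pvContains_eq (n : Int) : ∀ (x : Int), 0 ≤ x →
    (List.filter
        (fun y => decide ((pvSieveLoop n 2 (Array.replicate (n + 1).toNat true)).getD y.toNat false = true))
        (PySem.List.pyRange 2 n 1)).contains x
      = (decide (x < n) && pvIsPrime x) := by
  intro x hx
  rw [Bool.eq_iff_iff]
  simp only [List.contains_iff_mem, List.mem_filter, PySem.List.mem_pyRange_one,
    Bool.and_eq_true, decide_eq_true_eq, pvIsPrime_iff]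
  constructor
  · rintro ⟨⟨h2, hlt⟩, hent⟩
    exact ⟨hlt, h2, (pvSieve_char n x h2 (by omega)).mp hent⟩
  · rintro ⟨hlt, h2, hOK⟩
    exact ⟨⟨h2, hlt⟩, (pvSieve_char n x h2 (by omega)).mpr hOK⟩

theorem pvAll (n : Int) (P : Int → Bool)
    (hP : ∀ x : Int, 0 ≤ x → P x = (decide (x < n) && pvIsPrime x)) :
    ∀ (h : pvFibInv ([0, 1] : List Int)) (h2 : (0:Int) ≤ 0 ∧ (1:Int) ≤ 1 ∧ (0:Int) ≤ 1),
      (pvFibLoop n [0, 1] h).filter P = pvFibCollect n 0 1 [] h2 := by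
  intro h h2
  rw [pvFibLoop_eq_tail, pvFibCollect_eq_ghost, List.nil_append]
  rw [pvTail_congr' n _ _ 1 0 (by decide) (by decide)]
  rw [List.filter_append]
  have hP0 : P 0 = false := by rw [hP 0 (by norm_num), pvIsPrime_zero]; simp
  have hP1 : P 1 = false := by rw [hP 1 (by norm_num), pvIsPrime_one]; simp
  simp only [List.filter_cons, List.filter_nil, hP0, hP1, Bool.false_eq_true, if_false,
    List.nil_append]
  rw [pvTail_ghost n P hP 1 0]
  rw [pvGhost_congr' n (1 + 0) (2 * 1 + 0) 1 2 (by norm_num) (by norm_num)]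
  rw [pvGhost01 n]

theorem pvMain (n : Int) : primeFibonacci n = primeFibonacci_alt n := by
  simp only [primeFibonacci, primeFibonacci_alt]
  rw [PySem.List.foldl_append_ite_eq_filter, List.nil_append]
  exact pvAll n _ (pvContains_eq n) _ _


-- ===== VERDICT (by name: the statement is the Claim_ definition above) =====
theorem primeFibonacci_spec : Claim_equal_primeFibonacci := by
  intro n _
  unfold Spec_primeFibonacci
  exact pvMain n
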